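-- pv_equiv track=rewrite | github.com/Team3132/FRC-2022 | src/main/jevois/main.py | cal_corners
-- ===== SOURCE A (Python) =====
-- class Corner:
--     def __init__(self):
--         self.xy = []
--         self.score = -10000
--
--     def update_score(self, X, Y, score):
--         if score > self.score:
--             self.xy = [X, Y]
--             self.score = score
--
-- def cal_corners(contour):
--     TL_corner = Corner()
--     TR_corner = Corner()
--     BL_corner = Corner()
--     BR_corner = Corner()
--     for point in contour:
--         x = point[0][0]  # +ve is more right
--         y = point[0][1]  # +ve is more down
--         TL_corner.update_score(x, y, -x - y)
--         TR_corner.update_score(x, y, x - y)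
--         BL_corner.update_score(x, y, -x + y)
--         BR_corner.update_score(x, y, x + y)
--     TL = TL_corner.xy
--     TR = TR_corner.xy
--     BL = BL_corner.xy
--     BR = BR_corner.xy
--     return TL, TR, BL, BR
-- ===== SOURCE B (Python) =====
-- def cal_corners(contour):
--     if not contour:
--         return [], [], [], []
--     pts = [(p[0][0], p[0][1]) for p in contour]
--     def corner(sx, sy):
--         x, y = max(pts, key=lambda q: sx * q[0] + sy * q[1])
--         return [x, y]
--     return corner(-1, -1), corner(1, -1), corner(-1, 1), corner(1, 1)
-- ===== Notes on version B (the rewrite author's own statement) =====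
-- stated objective: simpler
-- what changed: Replaces the Corner class and the single four-accumulator update loop by one extraction of the (x, y) points and four independent max-with-key passes (first maximal element, matching A's strict-improvement update).
-- intended difference: On nonempty contours whose points all lie so far in one direction that a corner's best score is <= A's initial -10000, A leaves that corner unset (a leftover of its sentinel initialisation) while B returns the actual extreme point, which is the intended corner. — e.g. on cal_corners([[[-10000, 0]]]): A returns ([-10000, 0], [], [-10000, 0], []), B returns ([-10000, 0], [-10000, 0], [-10000, 0], [-10000, 0])
import Mathlib
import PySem

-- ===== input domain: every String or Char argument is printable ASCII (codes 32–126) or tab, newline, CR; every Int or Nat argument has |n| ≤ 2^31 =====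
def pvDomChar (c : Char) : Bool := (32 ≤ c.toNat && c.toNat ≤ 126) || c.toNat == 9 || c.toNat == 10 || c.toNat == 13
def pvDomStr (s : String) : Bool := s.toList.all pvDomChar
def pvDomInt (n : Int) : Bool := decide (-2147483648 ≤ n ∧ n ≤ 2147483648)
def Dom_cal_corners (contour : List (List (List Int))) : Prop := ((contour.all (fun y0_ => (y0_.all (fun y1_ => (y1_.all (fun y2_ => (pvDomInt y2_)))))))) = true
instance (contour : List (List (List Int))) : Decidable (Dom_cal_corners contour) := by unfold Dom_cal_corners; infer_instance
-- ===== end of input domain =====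

-- B drops the Corner class: each corner is an independent max-with-key pass over the extracted points; on contours whose points all lie beyond A's -10000 initial score in one direction, A leaves that corner unset while B returns the actual extreme point (stated as D_ below).


-- ===== PORT A =====
-- point[0][0] / point[0][1]; exact on Pre_ (point nonempty, point[0] of length ≥ 2)
def pX (p : List (List Int)) : Int := (p.getD 0 []).getD 0 0
def pY (p : List (List Int)) : Int := (p.getD 0 []).getD 1 0

-- Corner.update_score: strict improvement replaces xy and score
def cornerUpdate (st : List Int × Int) (x y score : Int) : List Int × Int :=
  if score > st.2 then ([x, y], score) else st

def cal_corners (contour : List (List (List Int))) : List Int × List Int × List Int × List Int :=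
  let st := contour.foldl
    (fun (st : (List Int × Int) × (List Int × Int) × (List Int × Int) × (List Int × Int)) p =>
      let x := pX p
      let y := pY p
      (cornerUpdate st.1 x y (-x - y), cornerUpdate st.2.1 x y (x - y),
       cornerUpdate st.2.2.1 x y (-x + y), cornerUpdate st.2.2.2 x y (x + y)))
    (([], -10000), ([], -10000), ([], -10000), ([], -10000))
  (st.1.1, st.2.1.1, st.2.2.1.1, st.2.2.2.1)

-- ===== PORT B =====
-- corner(sx, sy): Python max(pts, key=...) on the nonempty pts, then [x, y]
def cornerB (pts : List (Int × Int)) (sx sy : Int) : List Int :=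
  match PySem.List.max? pts (fun q => sx * q.1 + sy * q.2) with
  | none => []
  | some q => [q.1, q.2]

def cal_corners_alt (contour : List (List (List Int))) : List Int × List Int × List Int × List Int :=
  if contour.isEmpty then ([], [], [], [])
  else
    let pts := contour.map (fun p => ((p.getD 0 []).getD 0 0, (p.getD 0 []).getD 1 0))
    (cornerB pts (-1) (-1), cornerB pts 1 (-1), cornerB pts (-1) 1, cornerB pts 1 1)

-- ===== PRECONDITION & SPEC =====
-- Pre_ excludes exactly the inputs where Python's point[0][0]/point[0][1] raises IndexError.
def Pre_cal_corners (contour : List (List (List Int))) : Prop :=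
  ∀ p ∈ contour, 1 ≤ p.length ∧ 2 ≤ (p.getD 0 []).length
instance (contour : List (List (List Int))) : Decidable (Pre_cal_corners contour) := by unfold Pre_cal_corners; infer_instance

def pvWitness_cal_corners : List (List (List Int)) := [[[1, 2]], [[3, -4]], [[0, 0]]]

-- On nonempty contours whose points all lie so deep in one direction that a corner's best score is ≤ A's initial -10000, A leaves that corner unset (a leftover of its sentinel initialisation) while B returns the actual extreme point, which is the intended corner.
def D_cal_corners (contour : List (List (List Int))) : Prop :=
  contour ≠ [] ∧
  ((∀ p ∈ contour, pX p + pY p ≥ 10000) ∨ (∀ p ∈ contour, pY p - pX p ≥ 10000) ∨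
   (∀ p ∈ contour, pX p - pY p ≥ 10000) ∨ (∀ p ∈ contour, -pX p - pY p ≥ 10000))
instance (contour : List (List (List Int))) : Decidable (D_cal_corners contour) := by unfold D_cal_corners; infer_instance

def Spec_cal_corners (contour : List (List (List Int))) (out : List Int × List Int × List Int × List Int) : Prop := ¬ D_cal_corners contour → out = cal_corners_alt contour
instance (contour : List (List (List Int))) (out : List Int × List Int × List Int × List Int) : Decidable (Spec_cal_corners contour out) := by unfold Spec_cal_corners; infer_instance

def pvDiffWitness_cal_corners : List (List (List Int)) := [[[-10000, 0]]]
def pvDiffWitnessOut_cal_corners : (List Int × List Int × List Int × List Int) × (List Int × List Int × List Int × List Int) :=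
  (([-10000, 0], [], [-10000, 0], []),
   ([-10000, 0], [-10000, 0], [-10000, 0], [-10000, 0]))

-- ===== CLAIM (what is proved, stated in full; the proofs are below) =====
def Claim_unchanged_cal_corners : Prop := ∀ (contour : List (List (List Int))), Dom_cal_corners contour → Pre_cal_corners contour → Spec_cal_corners contour (cal_corners contour)
def Claim_changed_cal_corners : Prop := Dom_cal_corners (pvDiffWitness_cal_corners) ∧ Pre_cal_corners (pvDiffWitness_cal_corners) ∧ D_cal_corners (pvDiffWitness_cal_corners) ∧ cal_corners (pvDiffWitness_cal_corners) = pvDiffWitnessOut_cal_corners.1 ∧ cal_corners_alt (pvDiffWitness_cal_corners) = pvDiffWitnessOut_cal_corners.2 ∧ pvDiffWitnessOut_cal_corners.1 ≠ pvDiffWitnessOut_cal_corners.2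
def Claim_exact_cal_corners : Prop := ∀ (contour : List (List (List Int))), Dom_cal_corners contour → Pre_cal_corners contour → D_cal_corners contour → cal_corners contour ≠ cal_corners_alt contour

-- ===== LEMMAS AND PROOFS =====

def cornerScore (sx sy : Int) (p : List (List Int)) : Int := sx * pX p + sy * pY p

-- the four-accumulator fold splits into four independent folds
theorem fold4_split (l : List (List (List Int))) (a b c d : List Int × Int) :
    l.foldl
      (fun (st : (List Int × Int) × (List Int × Int) × (List Int × Int) × (List Int × Int)) p =>
        let x := pX p
        let y := pY p
        (cornerUpdate st.1 x y (-x - y), cornerUpdate st.2.1 x y (x - y),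
         cornerUpdate st.2.2.1 x y (-x + y), cornerUpdate st.2.2.2 x y (x + y)))
      (a, b, c, d)
    = (l.foldl (fun st p => cornerUpdate st (pX p) (pY p) (-(pX p) - pY p)) a,
       l.foldl (fun st p => cornerUpdate st (pX p) (pY p) (pX p - pY p)) b,
       l.foldl (fun st p => cornerUpdate st (pX p) (pY p) (-(pX p) + pY p)) c,
       l.foldl (fun st p => cornerUpdate st (pX p) (pY p) (pX p + pY p)) d) := by
  induction l generalizing a b c d with
  | nil => rfl
  | cons h t ih => simpa using ih _ _ _ _

-- B's running first-max loop over the raw contour points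
def bStep (sc : List (List Int) → Int) (o : Option (List (List Int))) (p : List (List Int)) :
    Option (List (List Int)) :=
  match o with
  | none => some p
  | some m => if sc m < sc p then some p else some m

-- invariant linking A's (xy, score) accumulator to B's running first-max option
def cInv (sc : List (List Int) → Int) (st : List Int × Int) (o : Option (List (List Int))) : Prop :=
  (o = none ∧ st = ([], -10000)) ∨
  (∃ m, o = some m ∧ sc m ≤ -10000 ∧ st = ([], -10000)) ∨
  (∃ m, o = some m ∧ -10000 < sc m ∧ st = ([pX m, pY m], sc m))

theorem cInv_step (sc : List (List Int) → Int) (st : List Int × Int)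
    (o : Option (List (List Int))) (p : List (List Int)) (h : cInv sc st o) :
    cInv sc (cornerUpdate st (pX p) (pY p) (sc p)) (bStep sc o p) := by
  rcases h with ⟨ho, hst⟩ | ⟨m, ho, hm, hst⟩ | ⟨m, ho, hm, hst⟩ <;> subst ho hst
  · by_cases hp : -10000 < sc p
    · exact Or.inr (Or.inr ⟨p, rfl, hp, by simp [cornerUpdate, hp]⟩)
    · exact Or.inr (Or.inl ⟨p, rfl, by omega, by simp [cornerUpdate]; omega⟩)
  · by_cases hp : -10000 < sc p
    · have hlt : sc m < sc p := by omega
      exact Or.inr (Or.inr ⟨p, by simp [bStep, hlt], hp, by simp [cornerUpdate, hp]⟩)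
    · by_cases hlt : sc m < sc p
      · exact Or.inr (Or.inl ⟨p, by simp [bStep, hlt], by omega, by simp [cornerUpdate]; omega⟩)
      · exact Or.inr (Or.inl ⟨m, by simp [bStep, hlt], hm, by simp [cornerUpdate]; omega⟩)
  · by_cases hlt : sc m < sc p
    · exact Or.inr (Or.inr ⟨p, by simp [bStep, hlt], by omega, by simp [cornerUpdate, hlt]⟩)
    · exact Or.inr (Or.inr ⟨m, by simp [bStep, hlt], hm, by simp [cornerUpdate]; omega⟩)

theorem cInv_foldl (sc : List (List Int) → Int) (l : List (List (List Int))) :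
    ∀ (st : List Int × Int) (o : Option (List (List Int))), cInv sc st o →
      cInv sc (l.foldl (fun st p => cornerUpdate st (pX p) (pY p) (sc p)) st)
              (l.foldl (bStep sc) o) := by
  induction l with
  | nil => intro st o h; exact h
  | cons p t ih => intro st o h; exact ih _ _ (cInv_step sc st o p h)

theorem max?_eq_foldl_bStep (l : List (List (List Int))) (sc : List (List Int) → Int) :
    PySem.List.max? l sc = l.foldl (bStep sc) none := by
  unfold PySem.List.max?
  congr 1
  funext o p
  cases o <;> rfl

-- max with a key commutes with extracting the (x, y) pairs
theorem max?_map_pts (sx sy : Int) (l : List (List (List Int))) :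
    PySem.List.max? (l.map (fun p => (pX p, pY p))) (fun q => sx * q.1 + sy * q.2)
      = (PySem.List.max? l (cornerScore sx sy)).map (fun p => (pX p, pY p)) := by
  rw [max?_eq_foldl_bStep l (cornerScore sx sy)]
  unfold PySem.List.max?
  rw [List.foldl_map]
  have h : ∀ (o : Option (List (List Int))),
      List.foldl
        (fun acc p =>
          match acc with
          | none => some ((fun p => (pX p, pY p)) p)
          | some m => if (fun q => sx * q.1 + sy * q.2) m < (fun q => sx * q.1 + sy * q.2) ((fun p => (pX p, pY p)) p)
              then some ((fun p => (pX p, pY p)) p) else some m)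
        (o.map (fun p => (pX p, pY p))) l
      = (l.foldl (bStep (cornerScore sx sy)) o).map (fun p => (pX p, pY p)) := by
    induction l with
    | nil => intro o; rfl
    | cons p t ih =>
      intro o
      have hstep :
          (match o.map (fun p => (pX p, pY p)) with
           | none => some (pX p, pY p)
           | some m => if sx * m.1 + sy * m.2 < sx * pX p + sy * pY p then some (pX p, pY p) else some m)
          = (bStep (cornerScore sx sy) o p).map (fun p => (pX p, pY p)) := by
        cases o with
        | none => rfl
        | some m =>
          simp only [Option.map_some, bStep, cornerScore]
          split_ifs <;> rfl
      simpa [hstep] using ih _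
  refine Eq.trans ?_ (h none)
  congr 1
  funext acc q
  cases acc <;> rfl

theorem cornerB_map (l : List (List (List Int))) (sx sy : Int) :
    cornerB (l.map (fun p => (pX p, pY p))) sx sy
      = (match PySem.List.max? l (cornerScore sx sy) with
         | none => ([] : List Int)
         | some m => [pX m, pY m]) := by
  unfold cornerB
  rw [max?_map_pts sx sy l]
  rcases PySem.List.max? l (cornerScore sx sy) with _ | m <;> rfl

-- one corner of A equals one corner of B when some point beats the -10000 start
theorem cornerA_eq (l : List (List (List Int))) (sx sy : Int)
    (hex : ∃ p ∈ l, -10000 < cornerScore sx sy p) :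
    (l.foldl (fun st p => cornerUpdate st (pX p) (pY p) (cornerScore sx sy p)) ([], -10000)).1
      = cornerB (l.map (fun p => (pX p, pY p))) sx sy := by
  rcases hex with ⟨p0, hp0, hgt⟩
  have hinv := cInv_foldl (cornerScore sx sy) l ([], -10000) none (Or.inl ⟨rfl, rfl⟩)
  rw [← max?_eq_foldl_bStep] at hinv
  rcases hmax : PySem.List.max? l (cornerScore sx sy) with _ | m
  · exact absurd ((PySem.List.max?_eq_none_iff _ _).mp hmax) (by rintro rfl; simp at hp0)
  · have hle := PySem.List.max?_isMax hmax p0 hp0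
    rw [cornerB_map, hmax]
    rcases hinv with ⟨ho, _⟩ | ⟨m', ho, hm', _⟩ | ⟨m', ho, _, hst⟩ <;> rw [hmax] at ho
    · exact absurd ho (by simp)
    · exact absurd hm' (by simp at ho; subst ho; omega)
    · simp at ho; subst ho; rw [hst]

-- if every point scores at most -10000, A's corner stays []
theorem cornerA_stuck (sc : List (List Int) → Int) (l : List (List (List Int)))
    (h : ∀ p ∈ l, sc p ≤ -10000) :
    (l.foldl (fun st p => cornerUpdate st (pX p) (pY p) (sc p)) ([], -10000)).1 = [] := by
  have : l.foldl (fun st p => cornerUpdate st (pX p) (pY p) (sc p)) ([], -10000) = ([], -10000) := by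
    induction l with
    | nil => rfl
    | cons p t ih =>
      have hp := h p (by simp)
      have hstep : cornerUpdate ([], -10000) (pX p) (pY p) (sc p) = ([], -10000) := by
        simp [cornerUpdate]; omega
      simpa [hstep] using ih (fun q hq => h q (by simp [hq]))
  rw [this]

-- B's corner on a nonempty contour is a two-element list
theorem cornerB_ne_nil (l : List (List (List Int))) (sx sy : Int) (hne : l ≠ []) :
    cornerB (l.map (fun p => (pX p, pY p))) sx sy ≠ [] := by
  rw [cornerB_map]
  rcases hmax : PySem.List.max? l (cornerScore sx sy) with _ | m
  · exact absurd ((PySem.List.max?_eq_none_iff _ _).mp hmax) hne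
  · simp

theorem score_tl (p : List (List Int)) : -(pX p) - pY p = cornerScore (-1) (-1) p := by
  unfold cornerScore; ring
theorem score_tr (p : List (List Int)) : pX p - pY p = cornerScore 1 (-1) p := by
  unfold cornerScore; ring
theorem score_bl (p : List (List Int)) : -(pX p) + pY p = cornerScore (-1) 1 p := by
  unfold cornerScore; ring
theorem score_br (p : List (List Int)) : pX p + pY p = cornerScore 1 1 p := by
  unfold cornerScore; ring

-- A's whole result as the four independent corner folds over cornerScore
theorem calA_split (contour : List (List (List Int))) :
    cal_corners contour =
      ((contour.foldl (fun st p => cornerUpdate st (pX p) (pY p) (cornerScore (-1) (-1) p)) ([], -10000)).1,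
       (contour.foldl (fun st p => cornerUpdate st (pX p) (pY p) (cornerScore 1 (-1) p)) ([], -10000)).1,
       (contour.foldl (fun st p => cornerUpdate st (pX p) (pY p) (cornerScore (-1) 1 p)) ([], -10000)).1,
       (contour.foldl (fun st p => cornerUpdate st (pX p) (pY p) (cornerScore 1 1 p)) ([], -10000)).1) := by
  unfold cal_corners
  rw [fold4_split]
  simp only [score_tl, score_tr, score_bl, score_br]

theorem calB_cons (contour : List (List (List Int))) (hne : contour ≠ []) :
    cal_corners_alt contour =
      (cornerB (contour.map (fun p => (pX p, pY p))) (-1) (-1),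
       cornerB (contour.map (fun p => (pX p, pY p))) 1 (-1),
       cornerB (contour.map (fun p => (pX p, pY p))) (-1) 1,
       cornerB (contour.map (fun p => (pX p, pY p))) 1 1) := by
  unfold cal_corners_alt
  rw [if_neg (by simpa using hne)]
  rfl

-- ===== VERDICT (by name: the statement is the Claim_ definition above) =====
theorem cal_corners_spec : Claim_unchanged_cal_corners := by
  intro contour _ _ hnd
  show cal_corners contour = cal_corners_alt contour
  rcases eq_or_ne contour [] with rfl | hne
  · rfl
  · rw [calA_split, calB_cons contour hne]
    unfold D_cal_corners at hnd
    push Not at hnd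
    obtain ⟨⟨p1, hp1, h1⟩, ⟨p2, hp2, h2⟩, ⟨p3, hp3, h3⟩, ⟨p4, hp4, h4⟩⟩ := hnd hne
    rw [cornerA_eq contour (-1) (-1) ⟨p1, hp1, by rw [← score_tl]; omega⟩,
        cornerA_eq contour 1 (-1) ⟨p2, hp2, by rw [← score_tr]; omega⟩,
        cornerA_eq contour (-1) 1 ⟨p3, hp3, by rw [← score_bl]; omega⟩,
        cornerA_eq contour 1 1 ⟨p4, hp4, by rw [← score_br]; omega⟩]

theorem cal_corners_changed : Claim_changed_cal_corners := by
  unfold Claim_changed_cal_corners; decide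

theorem cal_corners_tight : Claim_exact_cal_corners := by
  intro contour _ _ hd heq
  obtain ⟨hne, hc⟩ := hd
  rw [calA_split, calB_cons contour hne] at heq
  rcases hc with h | h | h | h
  · have ha := cornerA_stuck (cornerScore (-1) (-1)) contour
      (fun p hp => by have := h p hp; rw [← score_tl]; omega)
    have hb := cornerB_ne_nil contour (-1) (-1) hne
    exact hb ((congrArg (fun t => t.1) heq).symm.trans ha)
  · have ha := cornerA_stuck (cornerScore 1 (-1)) contour
      (fun p hp => by have := h p hp; rw [← score_tr]; omega)
    have hb := cornerB_ne_nil contour 1 (-1) hne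
    exact hb ((congrArg (fun t => t.2.1) heq).symm.trans ha)
  · have ha := cornerA_stuck (cornerScore (-1) 1) contour
      (fun p hp => by have := h p hp; rw [← score_bl]; omega)
    have hb := cornerB_ne_nil contour (-1) 1 hne
    exact hb ((congrArg (fun t => t.2.2.1) heq).symm.trans ha)
  · have ha := cornerA_stuck (cornerScore 1 1) contour
      (fun p hp => by have := h p hp; rw [← score_br]; omega)
    have hb := cornerB_ne_nil contour 1 1 hne
    exact hb ((congrArg (fun t => t.2.2.2) heq).symm.trans ha)
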